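-- pv_equiv track=rewrite | github.com/doralalam/Projects | mf-intelligence/standardizers/icici_standardizer.py | _pick_yield_col
-- ===== SOURCE A (Python) =====
-- def _pick_yield_col(columns):
--     lowered = {str(c).strip().lower(): c for c in columns}
--     for key in lowered:
--         if key == "yield of the instrument":
--             return lowered[key]
--     for key in lowered:
--         if "yield of the instrument" in key:
--             return lowered[key]
--     for key in lowered:
--         if key.startswith("yield"):
--             return lowered[key]
--     return None
-- ===== SOURCE B (Python) =====
-- def _pick_yield_col(columns):
--     lowered = {str(c).strip().lower(): c for c in columns}
--     exact = substr = prefix = None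
--     for key, val in lowered.items():
--         if exact is None and key == "yield of the instrument":
--             exact = val
--         if substr is None and "yield of the instrument" in key:
--             substr = val
--         if prefix is None and key.startswith("yield"):
--             prefix = val
--     if exact is not None:
--         return exact
--     if substr is not None:
--         return substr
--     if prefix is not None:
--         return prefix
--     return None
-- ===== Notes on version B (the rewrite author's own statement) =====
-- stated objective: simpler
-- what changed: Replaces A's three separate scans over the dict keys with one pass over the items that captures the first exact/substring/prefix match in three candidate variables, then returns by tier priority.
import Mathlib
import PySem

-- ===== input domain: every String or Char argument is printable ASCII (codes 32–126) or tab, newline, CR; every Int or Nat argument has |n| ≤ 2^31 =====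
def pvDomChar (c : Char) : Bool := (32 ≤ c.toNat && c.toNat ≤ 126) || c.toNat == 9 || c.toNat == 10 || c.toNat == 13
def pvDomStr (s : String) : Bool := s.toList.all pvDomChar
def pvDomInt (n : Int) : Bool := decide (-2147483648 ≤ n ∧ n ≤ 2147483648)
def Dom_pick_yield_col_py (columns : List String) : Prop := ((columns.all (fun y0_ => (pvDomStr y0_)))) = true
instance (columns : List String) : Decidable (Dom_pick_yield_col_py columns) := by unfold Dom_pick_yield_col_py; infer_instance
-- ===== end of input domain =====

-- B replaces A's three separate scans over the dict keys with one tiered pass over the items (objective: simpler).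

-- ===== PORT A =====
-- the dict comprehension {str(c).strip().lower(): c for c in columns}, shared verbatim by both Pythons
def pvLowered (columns : List String) : PySem.Dict String String :=
  columns.foldl (fun d c => d.insert (PySem.Str.lower (PySem.Str.strip c)) c) PySem.Dict.empty

-- three 'for key in lowered: if …: return lowered[key]' loops, in order, then None
def pick_yield_col_py (columns : List String) : Option String :=
  match (pvLowered columns).keys.find? (fun key => key == "yield of the instrument") with
  | some key => (pvLowered columns).get? key
  | none =>
    match (pvLowered columns).keys.find? (fun key => PySem.Str.isIn "yield of the instrument" key) with
    | some key => (pvLowered columns).get? key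
    | none =>
      match (pvLowered columns).keys.find? (fun key => PySem.Str.startswith key "yield") with
      | some key => (pvLowered columns).get? key
      | none => none

-- ===== PORT B =====
-- Source B's final if-chain: exact, else substr, else prefix, else None
def pvTiers (st : Option String × Option String × Option String) : Option String :=
  if st.1.isSome then st.1
  else if st.2.1.isSome then st.2.1
  else if st.2.2.isSome then st.2.2
  else none

-- Source B: one pass over lowered.items() capturing the first match of each tier, then the if-chain
def pick_yield_col_py_alt (columns : List String) : Option String :=
  pvTiers ((pvLowered columns).items.foldl
    (fun (st : Option String × Option String × Option String) kv =>
      (if st.1.isNone && (kv.1 == "yield of the instrument") then some kv.2 else st.1,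
       if st.2.1.isNone && PySem.Str.isIn "yield of the instrument" kv.1 then some kv.2 else st.2.1,
       if st.2.2.isNone && PySem.Str.startswith kv.1 "yield" then some kv.2 else st.2.2))
    (none, none, none))

-- ===== PRECONDITION & SPEC =====
def Spec_pick_yield_col_py (columns : List String) (out : Option String) : Prop := out = pick_yield_col_py_alt columns
instance (columns : List String) (out : Option String) : Decidable (Spec_pick_yield_col_py columns out) := by unfold Spec_pick_yield_col_py; infer_instance

-- ===== CLAIM (what is proved, stated in full; the proofs are below) =====
def Claim_equal_pick_yield_col_py : Prop := ∀ (columns : List String), Dom_pick_yield_col_py columns → Spec_pick_yield_col_py columns (pick_yield_col_py columns)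

-- ===== LEMMAS AND PROOFS =====

-- value of B's accumulator for one tier with test `pred` after scanning items l from start e
def pvTier (l : List (String × String)) (e : Option String) (pred : String → Bool) : Option String :=
  if e.isSome then e else (l.find? (fun kv => pred kv.1)).map (·.2)

theorem pvLowered_nodup_keys (columns : List String) (d : PySem.Dict String String)
    (h : d.keys.Nodup) :
    (columns.foldl (fun d c => d.insert (PySem.Str.lower (PySem.Str.strip c)) c) d).keys.Nodup := by
  induction columns generalizing d with
  | nil => simpa using h
  | cons c cs ih => exact ih _ (PySem.Dict.nodup_keys_insert _ _ _ h)

theorem pvFind_keys (d : PySem.Dict String String) (pred : String → Bool) :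
    d.keys.find? pred = (d.items.find? (fun kv => pred kv.1)).map (·.1) := by
  have hk : d.keys = d.items.map (·.1) := rfl
  rw [hk, List.find?_map]
  rfl

theorem pvLookup (d : PySem.Dict String String) (h : d.keys.Nodup) (pred : String → Bool)
    (kv : String × String) (hf : d.items.find? (fun kv => pred kv.1) = some kv) :
    d.get? kv.1 = some kv.2 := by
  have hmem : kv ∈ d.items := List.mem_of_find?_eq_some hf
  exact PySem.Dict.get?_of_mem_items d (by simpa using hmem) h

theorem pvTier_fold (p1 p2 p3 : String → Bool) (l : List (String × String))
    (e s p : Option String) :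
    l.foldl
      (fun (st : Option String × Option String × Option String) kv =>
        (if st.1.isNone && p1 kv.1 then some kv.2 else st.1,
         if st.2.1.isNone && p2 kv.1 then some kv.2 else st.2.1,
         if st.2.2.isNone && p3 kv.1 then some kv.2 else st.2.2))
      (e, s, p)
    = (pvTier l e p1, pvTier l s p2, pvTier l p p3) := by
  induction l generalizing e s p with
  | nil => simp [pvTier]
  | cons kv rest ih =>
    rw [List.foldl_cons, ih]
    refine Prod.ext ?_ (Prod.ext ?_ ?_)
    · cases e <;> cases hp : p1 kv.1 <;> simp [pvTier, hp]
    · cases s <;> cases hp : p2 kv.1 <;> simp [pvTier, hp]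
    · cases p <;> cases hp : p3 kv.1 <;> simp [pvTier, hp]

-- ===== VERDICT (by name: the statement is the Claim_ definition above) =====
theorem pick_yield_col_py_spec : Claim_equal_pick_yield_col_py := by
  intro columns _
  unfold Spec_pick_yield_col_py pick_yield_col_py pick_yield_col_py_alt
  have hnd : (pvLowered columns).keys.Nodup :=
    pvLowered_nodup_keys columns PySem.Dict.empty (by simp [PySem.Dict.keys_empty])
  rw [pvTier_fold (fun key => key == "yield of the instrument") (fun key => PySem.Str.isIn "yield of the instrument" key) (fun key => PySem.Str.startswith key "yield")]
  simp only [pvTiers, pvTier, Option.isSome_none, Bool.false_eq_true, if_false]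
  rw [pvFind_keys, pvFind_keys, pvFind_keys]
  cases hf1 : (pvLowered columns).items.find? (fun kv => kv.1 == "yield of the instrument") with
  | some kv => simp [pvLookup _ hnd (fun key => key == "yield of the instrument") _ hf1]
  | none =>
    simp only [Option.map_none, Option.isSome_none, Bool.false_eq_true, if_false]
    cases hf2 : (pvLowered columns).items.find? (fun kv => PySem.Str.isIn "yield of the instrument" kv.1) with
    | some kv => simp [pvLookup _ hnd _ _ hf2]
    | none =>
      simp only [Option.map_none, Option.isSome_none, Bool.false_eq_true, if_false]
      cases hf3 : (pvLowered columns).items.find? (fun kv => PySem.Str.startswith kv.1 "yield") with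
      | some kv => simp [pvLookup _ hnd (fun key => PySem.Str.startswith key "yield") _ hf3]
      | none => simp
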